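-- pv_equiv track=rewrite | github.com/VENKATESHWARAN-R/project-zero-app | services/auth-service/src/services/token_service.py | validate_token_format
-- ===== SOURCE A (Python) =====
-- def validate_token_format(token: str) -> bool:
--     """
--     Basic validation of JWT token format.
--
--     Args:
--         token (str): Token to validate
--
--     Returns:
--         bool: True if format is valid
--     """
--     try:
--         if not token:
--             return False
--
--         # JWT should have 3 parts separated by dots
--         parts = token.split(".")
--         if len(parts) != 3:
--             return False
--
--         # Each part should be non-empty
--         return all(len(part) > 0 for part in parts)
--
--     except Exception:
--         return False
-- ===== SOURCE B (Python) =====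
-- def validate_token_format(token: str) -> bool:
--     """Single pass over the characters: count dots and reject empty segments on the fly."""
--     dots = 0
--     seg = 0
--     for ch in token:
--         if ch == '.':
--             if seg == 0:
--                 return False
--             dots += 1
--             seg = 0
--         else:
--             seg += 1
--     return dots == 2 and seg > 0
-- ===== Notes on version B (the rewrite author's own statement) =====
-- stated objective: alternative
-- what changed: Replaced split-into-parts-then-check (length == 3 and all parts non-empty) with a single character-level state machine that counts dots, rejects an empty segment as soon as a dot follows it, and finally checks exactly two dots and a non-empty last segment; no parts list is built.
import Mathlib
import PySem

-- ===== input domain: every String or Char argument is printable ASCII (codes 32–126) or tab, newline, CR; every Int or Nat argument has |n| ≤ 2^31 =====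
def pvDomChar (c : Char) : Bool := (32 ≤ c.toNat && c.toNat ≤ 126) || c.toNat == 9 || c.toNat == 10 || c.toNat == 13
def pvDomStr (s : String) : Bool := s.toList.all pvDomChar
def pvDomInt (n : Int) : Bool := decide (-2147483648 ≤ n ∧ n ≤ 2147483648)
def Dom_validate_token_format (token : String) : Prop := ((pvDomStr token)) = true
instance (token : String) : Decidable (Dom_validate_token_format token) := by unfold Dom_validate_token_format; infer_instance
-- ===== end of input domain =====

-- B replaces A's split-into-parts-then-check with a one-pass character state machine
-- (count dots, reject an empty segment as it closes); same O(n) cost, no parts list is built.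


-- ===== PORT A =====
def validate_token_format (token : String) : Bool :=
  if token == "" then false                             -- if not token: return False
  else
    match PySem.Str.split? token "." with               -- parts = token.split(".")
    | none => false                                     -- unreachable: the separator "." is non-empty
    | some parts =>
      if parts.length ≠ 3 then false                    -- if len(parts) != 3: return False
      else parts.all (fun p => decide (0 < PySem.Str.len p))  -- all(len(part) > 0 for part in parts)

-- ===== PORT B =====
-- the loop body of Source B; `none` models the early `return False`
def vtfStep (st : Option (Nat × Nat)) (ch : Char) : Option (Nat × Nat) :=
  match st with
  | none => none
  | some (dots, seg) =>
    if ch == '.' then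
      (if seg == 0 then none else some (dots + 1, 0))
    else some (dots, seg + 1)

def validate_token_format_alt (token : String) : Bool :=
  let st := token.toList.foldl vtfStep (some (0, 0))
  match st with
  | none => false
  | some (dots, seg) => dots == 2 && decide (0 < seg)

-- ===== PRECONDITION & SPEC =====
def Spec_validate_token_format (token : String) (out : Bool) : Prop := out = validate_token_format_alt token
instance (token : String) (out : Bool) : Decidable (Spec_validate_token_format token out) := by unfold Spec_validate_token_format; infer_instance

-- ===== CLAIM (what is proved, stated in full; the proofs are below) =====
def Claim_equal_validate_token_format : Prop := ∀ (token : String), Dom_validate_token_format token → Spec_validate_token_format token (validate_token_format token)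

-- ===== LEMMAS AND PROOFS =====

theorem modifyHead_id' {α : Type} (l : List α) : List.modifyHead (fun x => x) l = l := by
  cases l <;> simp

-- A simple structural recursion computing Python's split on the single-char separator '.'.
def split1 : List Char → List (List Char)
  | [] => [[]]
  | c :: rest =>
    if c = '.' then [] :: split1 rest
    else
      match split1 rest with
      | [] => [[c]]
      | p :: ps => (c :: p) :: ps

theorem split1_ne_nil (l : List Char) : split1 l ≠ [] := by
  cases l with
  | nil => simp [split1]
  | cons c rest =>
    simp only [split1]
    split_ifs
    · simp
    · cases h : split1 rest <;> simp

theorem go_eq (fuel : Nat) : ∀ (l cur : List Char) (acc : List (List Char)), l.length < fuel →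
    PySem.Chars.splitOn.go ['.'] fuel l cur acc
      = acc.reverse ++ (split1 l).modifyHead (cur.reverse ++ ·) := by
  induction fuel with
  | zero => intro l cur acc h; omega
  | succ f ih =>
    intro l cur acc h
    cases l with
    | nil =>
      simp [PySem.Chars.splitOn.go, split1]
    | cons c rest =>
      by_cases hc : c = '.'
      · subst hc
        have hp : (['.'].isPrefixOf ('.' :: rest)) = true := by simp [List.isPrefixOf]
        simp only [PySem.Chars.splitOn.go, hp, if_pos, List.length_cons, List.drop_succ_cons, List.length_nil, List.drop_zero]
        rw [ih rest [] (cur.reverse :: acc) (by simpa using Nat.lt_of_succ_lt_succ h)]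
        simp [split1, modifyHead_id']
      · have hp : (['.'].isPrefixOf (c :: rest)) = false := by
          simp [List.isPrefixOf, Ne.symm hc]
        simp only [PySem.Chars.splitOn.go, hp, Bool.false_eq_true, if_false]
        rw [ih rest (c :: cur) acc (by simpa using Nat.lt_of_succ_lt_succ h)]
        simp only [split1, if_neg hc]
        cases hs : split1 rest with
        | nil => exact absurd hs (split1_ne_nil rest)
        | cons p ps => simp

theorem splitOn_eq_split1 (l : List Char) : PySem.Chars.splitOn l ['.'] = split1 l := by
  rw [PySem.Chars.splitOn, go_eq (l.length + 1) l [] [] (by omega)]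
  simp [modifyHead_id']

theorem foldl_vtfStep_none (l : List Char) : l.foldl vtfStep none = none := by
  induction l with
  | nil => rfl
  | cons c r ih => simpa [vtfStep] using ih

-- closed form for B's fold, started from an arbitrary state, in terms of split1
theorem fold_closed (l : List Char) : ∀ (d s : Nat),
    l.foldl vtfStep (some (d, s)) =
      if (s + ((split1 l).headD []).length = 0 ∧ (split1 l).tail ≠ []) ∨ [] ∈ (split1 l).tail.dropLast then none
      else if (split1 l).tail = [] then some (d, s + ((split1 l).headD []).length)
      else some (d + (split1 l).tail.length, ((split1 l).tail.getLastD []).length) := by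
  induction l with
  | nil => intro d s; simp [split1]
  | cons c r ih =>
    intro d s
    by_cases hc : c = '.'
    · subst hc
      by_cases hs : s = 0
      · subst hs
        simp only [List.foldl_cons, vtfStep, beq_self_eq_true, if_pos, Nat.zero_add]
        rw [foldl_vtfStep_none]
        have hne : split1 r ≠ [] := split1_ne_nil r
        simp [split1, hne]
      · simp only [List.foldl_cons, vtfStep, beq_self_eq_true, if_pos]
        rw [if_neg (by simpa using hs)]
        rw [ih (d + 1) 0]
        cases hr : split1 r with
        | nil => exact absurd hr (split1_ne_nil r)
        | cons q qs =>
          cases qs with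
          | nil => simp [split1, hr, hs]
          | cons q2 qs2 =>
            by_cases hq : q = []
            · subst hq; simp [split1, hr, hs]
            · have hq' : q.length ≠ 0 := by simpa [List.length_eq_zero_iff] using hq
              simp [split1, hr, hs, hq, hq']
              split_ifs with h
              · rfl
              · have e : d + 1 + (qs2.length + 1) = d + (qs2.length + 1 + 1) := by omega
                rw [e]
    · simp only [List.foldl_cons, vtfStep, beq_iff_eq, if_neg hc]
      rw [ih d (s + 1)]
      cases hr : split1 r with
      | nil => exact absurd hr (split1_ne_nil r)
      | cons q qs =>
        simp only [split1, if_neg hc, hr, List.headD_cons, List.tail_cons, List.length_cons]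
        have e : s + 1 + q.length = s + (q.length + 1) := by omega
        rw [e]

theorem main_eq (token : String) : validate_token_format token = validate_token_format_alt token := by
  by_cases h0 : token = ""
  · subst h0; rfl
  · unfold validate_token_format validate_token_format_alt
    rw [if_neg (by simpa using h0)]
    simp only [PySem.Str.split?, PySem.Chars.split?]
    norm_num
    rw [show ".".toList = ['.'] from rfl, splitOn_eq_split1, fold_closed token.toList 0 0]
    cases hs : split1 token.toList with
    | nil => exact absurd hs (split1_ne_nil _)
    | cons p ps =>
      cases ps with
      | nil => simp
      | cons q ps2 =>
        cases ps2 with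
        | nil => by_cases hp : p = [] <;> simp [hp]
        | cons r ps3 =>
          cases ps3 with
          | nil =>
            by_cases hp : p = []
            · subst hp; simp
            · by_cases hq : q = []
              · subst hq; simp [hp]
              · simp [hp, hq, List.length_eq_zero_iff, List.length_pos_iff]
          | cons w ps4 => split_ifs <;> simp

-- ===== VERDICT (by name: the statement is the Claim_ definition above) =====
theorem validate_token_format_spec : Claim_equal_validate_token_format := by
  intro token _
  exact main_eq token
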